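-- pv_equiv track=rewrite | github.com/jorgeing/ignition | CodeBase_2026-03-11_1957/ignition/script-python/fd/envasado/datoscajasenvasado/code.py | _generaFilasConSubtotales
-- ===== SOURCE A (Python) =====
-- def _generaFilasConSubtotales(datos_agrupados):
-- 	filas = []
-- 	for cliente in sorted(datos_agrupados.keys()):
-- 		subtotal_cliente = 0
-- 		for color in datos_agrupados[cliente]:
-- 			for molde in datos_agrupados[cliente][color]:
-- 				subtotal_cliente += datos_agrupados[cliente][color][molde]
-- 		filas.append([cliente, subtotal_cliente])
--
-- 		for color in sorted(datos_agrupados[cliente].keys()):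
-- 			subtotal_color = 0
-- 			for molde in datos_agrupados[cliente][color]:
-- 				subtotal_color += datos_agrupados[cliente][color][molde]
-- 			filas.append([("\t -" + color).expandtabs(8), subtotal_color])
--
-- 			for molde in sorted(datos_agrupados[cliente][color].keys()):
-- 				subtotal_molde = datos_agrupados[cliente][color][molde]
-- 				filas.append([("\t -" + molde).expandtabs(16), subtotal_molde])
--
-- 	return filas
-- ===== SOURCE B (Python) =====
-- def _generaFilasConSubtotales(datos_agrupados):
-- 	# Single unsorted pass over the tree emits every row once, tagged with a
-- 	# composite sort key; one global sort then puts all rows in report order.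
-- 	keyed = []
-- 	for cliente, colores in datos_agrupados.items():
-- 		total_cliente = 0
-- 		for color, moldes in colores.items():
-- 			total_color = 0
-- 			for molde, valor in moldes.items():
-- 				total_color += valor
-- 				keyed.append(((cliente, 1, color, 1, molde),
-- 				              ("\t -" + molde).expandtabs(16), valor))
-- 			keyed.append(((cliente, 1, color, 0, ""),
-- 			              ("\t -" + color).expandtabs(8), total_color))
-- 			total_cliente += total_color
-- 		keyed.append(((cliente, 0, "", 0, ""), cliente, total_cliente))
-- 	keyed.sort(key=lambda fila: fila[0])
-- 	return [[etiqueta, valor] for _, etiqueta, valor in keyed]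
-- ===== Notes on version B (the rewrite author's own statement) =====
-- stated objective: alternative
-- what changed: B makes one unsorted pass over the tree, emitting every row tagged with a composite (cliente, level, color, level, molde) key while accumulating running subtotals, then a single global sort by that key produces the report order, replacing A's nested per-level sorted() loops and its re-summation of each subtree (once for the client total, again per color).
import Mathlib
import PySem

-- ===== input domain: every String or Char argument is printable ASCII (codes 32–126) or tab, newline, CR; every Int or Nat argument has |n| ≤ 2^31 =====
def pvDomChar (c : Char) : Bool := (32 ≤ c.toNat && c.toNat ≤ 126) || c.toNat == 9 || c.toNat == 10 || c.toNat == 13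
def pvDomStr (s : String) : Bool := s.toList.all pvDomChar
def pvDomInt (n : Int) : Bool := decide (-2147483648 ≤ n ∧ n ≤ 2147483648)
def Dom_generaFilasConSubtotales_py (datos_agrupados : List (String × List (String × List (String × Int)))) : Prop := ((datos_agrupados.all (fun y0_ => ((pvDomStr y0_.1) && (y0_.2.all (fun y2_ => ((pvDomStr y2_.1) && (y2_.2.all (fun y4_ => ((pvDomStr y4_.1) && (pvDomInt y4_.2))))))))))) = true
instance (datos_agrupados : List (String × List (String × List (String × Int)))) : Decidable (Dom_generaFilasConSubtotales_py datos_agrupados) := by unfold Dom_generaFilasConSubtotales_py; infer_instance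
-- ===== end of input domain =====

-- B replaces A's nested per-level sorted() loops (with the tree re-summed once for the
-- client total and again per color) by a single unsorted pass that emits every row tagged
-- with a composite (cliente, level, color, level, molde) key while accumulating running
-- subtotals, followed by ONE global sort by that key.

-- ===== PORT A =====
-- Hand port of str.expandtabs(t) for t > 0 (exact: a tab pads to the next multiple of t,
-- '\n'/'\r' reset the column, every other character advances it by one).
def pyExpandtabsAux (t : Nat) (col : Nat) : List Char → List Char
  | [] => []
  | c :: rest =>
    if c = '\t' then List.replicate (t - col % t) ' ' ++ pyExpandtabsAux t 0 rest
    else if c = '\n' ∨ c = '\r' then c :: pyExpandtabsAux t 0 rest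
    else c :: pyExpandtabsAux t (col + 1) rest

def pyExpandtabs (s : String) (t : Nat) : String := String.ofList (pyExpandtabsAux t 0 s.toList)

-- Shared decoding of the dict[str, dict[str, dict[str, int]]] argument (both Pythons
-- receive the same dict value): the association lists become PySem.Dicts.
def toDict3 (datos_agrupados : List (String × List (String × List (String × Int)))) :
    PySem.Dict String (PySem.Dict String (PySem.Dict String Int)) :=
  PySem.Dict.ofList (datos_agrupados.map (fun p =>
    (p.1, PySem.Dict.ofList (p.2.map (fun q => (q.1, PySem.Dict.ofList q.2))))))

def generaFilasConSubtotales_py (datos_agrupados : List (String × List (String × List (String × Int)))) : List (String × Int) :=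
  let d := toDict3 datos_agrupados
  (PySem.List.sorted d.keys (fun k => k) false).foldl (fun filas cliente =>
    let dc := d.getD cliente PySem.Dict.empty
    let subtotal_cliente := dc.keys.foldl (fun s color =>
        (dc.getD color PySem.Dict.empty).keys.foldl
          (fun s molde => s + (dc.getD color PySem.Dict.empty).getD molde 0) s) 0
    let filas := filas ++ [(cliente, subtotal_cliente)]
    (PySem.List.sorted dc.keys (fun k => k) false).foldl (fun filas color =>
      let dcc := dc.getD color PySem.Dict.empty
      let subtotal_color := dcc.keys.foldl (fun s molde => s + dcc.getD molde 0) 0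
      let filas := filas ++ [(pyExpandtabs ("\t -" ++ color) 8, subtotal_color)]
      (PySem.List.sorted dcc.keys (fun k => k) false).foldl
        (fun filas molde => filas ++ [(pyExpandtabs ("\t -" ++ molde) 16, dcc.getD molde 0)])
        filas) filas) []

-- ===== PORT B =====
-- Python's comparison of the 5-tuple sort keys (cliente, level, color, level, molde),
-- ported by hand component by component (exact: lexicographic tuple comparison).
def keyLt : (String × Nat × String × Nat × String) → (String × Nat × String × Nat × String) → Bool
  | (a, b, c, d, e), (a', b', c', d', e') =>
    decide (a < a') || (a == a' && (decide (b < b') || (b == b' &&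
      (decide (c < c') || (c == c' && (decide (d < d') || (d == d' && decide (e < e'))))))))

def generaFilasConSubtotales_py_alt (datos_agrupados : List (String × List (String × List (String × Int)))) : List (String × Int) :=
  let d := toDict3 datos_agrupados
  let keyed := d.items.foldl (fun keyed pc =>
    let res := pc.2.items.foldl
      (fun (acc : List ((String × Nat × String × Nat × String) × String × Int) × Int) pcol =>
        let res2 := pcol.2.items.foldl
          (fun (acc2 : List ((String × Nat × String × Nat × String) × String × Int) × Int) pm =>
            (acc2.1 ++ [((pc.1, 1, pcol.1, 1, pm.1), pyExpandtabs ("\t -" ++ pm.1) 16, pm.2)],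
             acc2.2 + pm.2))
          (acc.1, 0)
        (res2.1 ++ [((pc.1, 1, pcol.1, 0, ""), pyExpandtabs ("\t -" ++ pcol.1) 8, res2.2)],
         acc.2 + res2.2))
      (keyed, 0)
    res.1 ++ [((pc.1, 0, "", 0, ""), pc.1, res.2)]) []
  -- keyed.sort(key=lambda fila: fila[0]): stable sort with a tuple key, ported by hand as
  -- PySem.List.sorted's own insertion-sort shape with the tuple comparison keyLt (exact).
  (keyed.foldl (fun acc r => PySem.List.insertBy (fun a b => keyLt a.1 b.1) r acc) []).map
    (fun r => r.2)

-- ===== PRECONDITION & SPEC =====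
def Spec_generaFilasConSubtotales_py (datos_agrupados : List (String × List (String × List (String × Int)))) (out : List (String × Int)) : Prop := out = generaFilasConSubtotales_py_alt datos_agrupados
instance (datos_agrupados : List (String × List (String × List (String × Int)))) (out : List (String × Int)) : Decidable (Spec_generaFilasConSubtotales_py datos_agrupados out) := by unfold Spec_generaFilasConSubtotales_py; infer_instance

-- ===== CLAIM (what is proved, stated in full; the proofs are below) =====
def Claim_equal_generaFilasConSubtotales_py : Prop := ∀ (datos_agrupados : List (String × List (String × List (String × Int)))), Dom_generaFilasConSubtotales_py datos_agrupados → Spec_generaFilasConSubtotales_py datos_agrupados (generaFilasConSubtotales_py datos_agrupados)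

-- ===== LEMMAS AND PROOFS =====

-- The 5-tuple keys under Python's tuple order, as a lexicographic order (proof-side only).
def lexOf (x : String × Nat × String × Nat × String) :
    String ×ₗ (Nat ×ₗ (String ×ₗ (Nat ×ₗ String))) :=
  toLex (x.1, toLex (x.2.1, toLex (x.2.2.1, toLex (x.2.2.2.1, x.2.2.2.2))))

theorem lexOf_lt_iff (x y : String × Nat × String × Nat × String) :
    lexOf x < lexOf y ↔ x.1 < y.1 ∨ x.1 = y.1 ∧ (x.2.1 < y.2.1 ∨ x.2.1 = y.2.1 ∧
      (x.2.2.1 < y.2.2.1 ∨ x.2.2.1 = y.2.2.1 ∧ (x.2.2.2.1 < y.2.2.2.1 ∨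
        x.2.2.2.1 = y.2.2.2.1 ∧ x.2.2.2.2 < y.2.2.2.2))) := by
  simp [lexOf, Prod.Lex.lt_iff]

theorem keyLt_eq (x y : String × Nat × String × Nat × String) :
    keyLt x y = decide (lexOf x < lexOf y) := by
  obtain ⟨a, b, c, d, e⟩ := x
  obtain ⟨a', b', c', d', e'⟩ := y
  rw [Bool.eq_iff_iff]
  simp [keyLt, lexOf_lt_iff]

-- Sum of the values of an items list / total of a client's subtree.
def sumItems (l : List (String × Int)) : Int := (l.map Prod.snd).sum

def totalD (dc : PySem.Dict String (PySem.Dict String Int)) : Int :=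
  (dc.items.map (fun p => sumItems p.2.items)).sum

-- The report rows of one color / one client, in final order, with their sort keys.
def moldeRows (c col : String) (dcc : PySem.Dict String Int) :
    List ((String × Nat × String × Nat × String) × String × Int) :=
  (PySem.List.sorted dcc.keys (fun k => k) false).map
    (fun m => ((c, 1, col, 1, m), pyExpandtabs ("\t -" ++ m) 16, dcc.getD m 0))

def colorBlock (c col : String) (dcc : PySem.Dict String Int) :
    List ((String × Nat × String × Nat × String) × String × Int) :=
  ((c, 1, col, 0, ""), pyExpandtabs ("\t -" ++ col) 8, sumItems dcc.items) :: moldeRows c col dcc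

def canonBlock (c : String) (dc : PySem.Dict String (PySem.Dict String Int)) :
    List ((String × Nat × String × Nat × String) × String × Int) :=
  ((c, 0, "", 0, ""), c, totalD dc) ::
    (PySem.List.sorted dc.keys (fun k => k) false).flatMap
      (fun col => colorBlock c col (dc.getD col PySem.Dict.empty))

def canonRows (datos : List (String × List (String × List (String × Int)))) :
    List ((String × Nat × String × Nat × String) × String × Int) :=
  (PySem.List.sorted (toDict3 datos).keys (fun k => k) false).flatMap
    (fun c => canonBlock c ((toDict3 datos).getD c PySem.Dict.empty))

-- every value of a dict built by a fold of inserts is either an old value or one of the inserted ones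
theorem values_foldl_insert_subset {κ ν : Type} [BEq κ] [LawfulBEq κ]
    (l : List (κ × ν)) (d : PySem.Dict κ ν) (w : ν)
    (h : w ∈ (l.foldl (fun acc p => acc.insert p.1 p.2) d).values) :
    w ∈ d.values ∨ w ∈ l.map (·.2) := by
  induction l generalizing d with
  | nil => simpa using h
  | cons p rest ih =>
    simp only [List.foldl_cons] at h
    rcases ih _ h with h' | h'
    · rcases PySem.Dict.mem_values_insert d p.1 p.2 w h' with h'' | h''
      · right; simp [h'']
      · left; exact h''
    · right; simp [h']

theorem values_ofList_subset {κ ν : Type} [BEq κ] [LawfulBEq κ]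
    (ps : List (κ × ν)) (w : ν) (h : w ∈ (PySem.Dict.ofList ps).values) :
    w ∈ ps.map (·.2) := by
  have := values_foldl_insert_subset ps PySem.Dict.empty w h
  rcases this with h' | h'
  · simp [PySem.Dict.values, PySem.Dict.empty] at h'
  · exact h'

-- getD returns the default or a value of the dict
theorem getD_mem_values_or {κ ν : Type} [BEq κ] [LawfulBEq κ]
    (d : PySem.Dict κ ν) (k : κ) (dflt : ν) :
    d.getD k dflt = dflt ∨ d.getD k dflt ∈ d.values := by
  rw [PySem.Dict.getD_eq_get?_getD]
  cases hg : d.get? k with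
  | none => left; rfl
  | some v =>
    right
    have := PySem.Dict.mem_items_of_get?_eq_some d hg
    simp only [Option.getD_some]
    simpa [PySem.Dict.values] using List.mem_map_of_mem (f := (·.2)) this

theorem nodup_keys_level1 (datos : List (String × List (String × List (String × Int)))) (c : String) :
    ((toDict3 datos).getD c PySem.Dict.empty).keys.Nodup := by
  rcases getD_mem_values_or (toDict3 datos) c PySem.Dict.empty with h | h
  · rw [h]; simp [PySem.Dict.keys_empty]
  · have := values_ofList_subset _ _ h
    simp only [List.map_map, List.mem_map] at this
    obtain ⟨p, _, hp⟩ := this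
    rw [← hp]
    exact PySem.Dict.nodup_keys_ofList _

theorem nodup_keys_level2 (datos : List (String × List (String × List (String × Int)))) (c col : String) :
    (((toDict3 datos).getD c PySem.Dict.empty).getD col PySem.Dict.empty).keys.Nodup := by
  rcases getD_mem_values_or ((toDict3 datos).getD c PySem.Dict.empty) col PySem.Dict.empty with h | h
  · rw [h]; simp [PySem.Dict.keys_empty]
  · rcases getD_mem_values_or (toDict3 datos) c PySem.Dict.empty with h1 | h1
    · rw [h1] at h; simp [PySem.Dict.values, PySem.Dict.empty] at h
    · have := values_ofList_subset _ _ h1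
      simp only [List.map_map, List.mem_map] at this
      obtain ⟨p, _, hp⟩ := this
      rw [← hp] at h ⊢
      have := values_ofList_subset _ _ h
      simp only [List.map_map, List.mem_map] at this
      obtain ⟨q, _, hq⟩ := this
      rw [← hq]
      simp only [Function.comp_apply]
      exact PySem.Dict.nodup_keys_ofList _

-- sorted list of distinct strings is strictly increasing
theorem sorted_strict (l : List String) (h : l.Nodup) :
    (PySem.List.sorted l (fun k => k) false).Pairwise (· < ·) := by
  have hle := PySem.List.sorted_pairwise l (fun k => k)
  have hnd : (PySem.List.sorted l (fun k => k) false).Nodup :=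
    ((PySem.List.sorted_perm l (fun k => k) false).nodup_iff).mpr h
  exact (hle.and hnd).imp (fun h => lt_of_le_of_ne h.1 h.2)

-- A's inner summation loop over the keys of a nodup-keyed dict is "s + sum of values"
theorem inner_sum_eq (dcc : PySem.Dict String Int) (hnd : dcc.keys.Nodup) (s : Int) :
    dcc.keys.foldl (fun s molde => s + dcc.getD molde 0) s = s + sumItems dcc.items := by
  rw [PySem.List.foldl_add dcc.keys (fun molde => dcc.getD molde 0) s, sumItems,
    PySem.Dict.items_eq_map_keys dcc hnd 0, List.map_map]
  rfl

-- A's client-subtotal double loop computes totalD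
theorem client_sum_eq (datos : List (String × List (String × List (String × Int)))) (c : String) :
    ((toDict3 datos).getD c PySem.Dict.empty).keys.foldl (fun s color =>
        (((toDict3 datos).getD c PySem.Dict.empty).getD color PySem.Dict.empty).keys.foldl
          (fun s molde => s + (((toDict3 datos).getD c PySem.Dict.empty).getD color PySem.Dict.empty).getD molde 0) s) 0
      = totalD ((toDict3 datos).getD c PySem.Dict.empty) := by
  set dc := (toDict3 datos).getD c PySem.Dict.empty with hdc
  have h1 : dc.keys.foldl (fun s color =>
        (dc.getD color PySem.Dict.empty).keys.foldl
          (fun s molde => s + (dc.getD color PySem.Dict.empty).getD molde 0) s) 0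
      = dc.keys.foldl (fun s color => s + sumItems (dc.getD color PySem.Dict.empty).items) 0 := by
    apply PySem.List.foldl_congr_mem'
    intro col _ s
    exact inner_sum_eq _ (by rw [hdc]; exact nodup_keys_level2 datos c col) s
  rw [h1, PySem.List.foldl_add, totalD,
    PySem.Dict.items_eq_map_keys dc (by rw [hdc]; exact nodup_keys_level1 datos c) PySem.Dict.empty,
    List.map_map]
  simp [Function.comp_def]

-- ===== A computes the canonical rows (projected) =====
theorem A_eq_canon (datos : List (String × List (String × List (String × Int)))) :
    generaFilasConSubtotales_py datos = (canonRows datos).map (fun r => r.2) := by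
  unfold generaFilasConSubtotales_py canonRows
  dsimp only
  set d := toDict3 datos with hd
  have hbody : ∀ c ∈ PySem.List.sorted d.keys (fun k => k) false,
      ∀ filas : List (String × Int),
      (let dc := d.getD c PySem.Dict.empty
       let subtotal_cliente := dc.keys.foldl (fun s color =>
           (dc.getD color PySem.Dict.empty).keys.foldl
             (fun s molde => s + (dc.getD color PySem.Dict.empty).getD molde 0) s) 0
       let filas := filas ++ [(c, subtotal_cliente)]
       (PySem.List.sorted dc.keys (fun k => k) false).foldl (fun filas color =>
         let dcc := dc.getD color PySem.Dict.empty
         let subtotal_color := dcc.keys.foldl (fun s molde => s + dcc.getD molde 0) 0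
         let filas := filas ++ [(pyExpandtabs ("\t -" ++ color) 8, subtotal_color)]
         (PySem.List.sorted dcc.keys (fun k => k) false).foldl
           (fun filas molde => filas ++ [(pyExpandtabs ("\t -" ++ molde) 16, dcc.getD molde 0)])
           filas) filas)
      = filas ++ (canonBlock c (d.getD c PySem.Dict.empty)).map (fun r => r.2) := by
    intro c _ filas
    dsimp only
    set dc := d.getD c PySem.Dict.empty with hdc
    have hcolor : ∀ col ∈ PySem.List.sorted dc.keys (fun k => k) false,
        ∀ filas' : List (String × Int),
        (let dcc := dc.getD col PySem.Dict.empty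
         let subtotal_color := dcc.keys.foldl (fun s molde => s + dcc.getD molde 0) 0
         let filas' := filas' ++ [(pyExpandtabs ("\t -" ++ col) 8, subtotal_color)]
         (PySem.List.sorted dcc.keys (fun k => k) false).foldl
           (fun filas molde => filas ++ [(pyExpandtabs ("\t -" ++ molde) 16, dcc.getD molde 0)])
           filas')
        = filas' ++ (colorBlock c col (dc.getD col PySem.Dict.empty)).map (fun r => r.2) := by
      intro col _ filas'
      dsimp only
      rw [PySem.List.foldl_append_singleton_eq_map]
      rw [inner_sum_eq _ (by rw [hdc, hd]; exact nodup_keys_level2 datos c col) 0, zero_add]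
      simp [colorBlock, moldeRows, List.map_map, Function.comp_def, List.append_assoc]
    calc _ = (PySem.List.sorted dc.keys (fun k => k) false).foldl
              (fun filas' col => filas' ++ (colorBlock c col (dc.getD col PySem.Dict.empty)).map (fun r => r.2))
              (filas ++ [(c, totalD dc)]) := by
            rw [hdc, hd, client_sum_eq datos c]
            exact PySem.List.foldl_congr_mem' _ _ _ _ (fun col hcol acc => hcolor col hcol acc)
      _ = filas ++ (canonBlock c dc).map (fun r => r.2) := by
            rw [PySem.List.foldl_append_eq_flatMap]
            simp [canonBlock, List.map_flatMap, List.append_assoc]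
  rw [PySem.List.foldl_congr_mem' _ _
      (fun filas c => filas ++ (canonBlock c (d.getD c PySem.Dict.empty)).map (fun r => r.2)) _
      hbody,
    PySem.List.foldl_append_eq_flatMap]
  simp [List.map_flatMap]

-- generic pair-state fold: append to the list component, add to the sum component
theorem foldl_pair {α β : Type} (l : List α) (h : α → List β) (v : α → Int)
    (rows : List β) (t : Int) :
    l.foldl (fun acc x => (acc.1 ++ h x, acc.2 + v x)) (rows, t)
      = (rows ++ l.flatMap h, t + (l.map v).sum) := by
  induction l generalizing rows t with
  | nil => simp
  | cons x xs ih => simp [ih, add_assoc]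

-- B's building pass produces, per client (in dict order), the rows of that client
theorem keyed_eq_flatMap (datos : List (String × List (String × List (String × Int)))) :
    (toDict3 datos).items.foldl (fun keyed pc =>
      let res := pc.2.items.foldl
        (fun (acc : List ((String × Nat × String × Nat × String) × String × Int) × Int) pcol =>
          let res2 := pcol.2.items.foldl
            (fun (acc2 : List ((String × Nat × String × Nat × String) × String × Int) × Int) pm =>
              (acc2.1 ++ [((pc.1, 1, pcol.1, 1, pm.1), pyExpandtabs ("\t -" ++ pm.1) 16, pm.2)],
               acc2.2 + pm.2))
            (acc.1, 0)
          (res2.1 ++ [((pc.1, 1, pcol.1, 0, ""), pyExpandtabs ("\t -" ++ pcol.1) 8, res2.2)],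
           acc.2 + res2.2))
        (keyed, 0)
      res.1 ++ [((pc.1, 0, "", 0, ""), pc.1, res.2)]) []
    = (toDict3 datos).items.flatMap (fun pc =>
        (pc.2.items.flatMap (fun pcol =>
          pcol.2.items.map (fun pm =>
            ((pc.1, 1, pcol.1, 1, pm.1), pyExpandtabs ("\t -" ++ pm.1) 16, pm.2))
          ++ [((pc.1, 1, pcol.1, 0, ""), pyExpandtabs ("\t -" ++ pcol.1) 8, sumItems pcol.2.items)]))
        ++ [((pc.1, 0, "", 0, ""), pc.1, totalD pc.2)]) := by
  have hbody : ∀ pc ∈ (toDict3 datos).items,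
      ∀ keyed : List ((String × Nat × String × Nat × String) × String × Int),
      (let res := pc.2.items.foldl
        (fun (acc : List ((String × Nat × String × Nat × String) × String × Int) × Int) pcol =>
          let res2 := pcol.2.items.foldl
            (fun (acc2 : List ((String × Nat × String × Nat × String) × String × Int) × Int) pm =>
              (acc2.1 ++ [((pc.1, 1, pcol.1, 1, pm.1), pyExpandtabs ("\t -" ++ pm.1) 16, pm.2)],
               acc2.2 + pm.2))
            (acc.1, 0)
          (res2.1 ++ [((pc.1, 1, pcol.1, 0, ""), pyExpandtabs ("\t -" ++ pcol.1) 8, res2.2)],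
           acc.2 + res2.2))
        (keyed, 0)
       res.1 ++ [((pc.1, 0, "", 0, ""), pc.1, res.2)])
      = keyed ++ ((pc.2.items.flatMap (fun pcol =>
          pcol.2.items.map (fun pm =>
            ((pc.1, 1, pcol.1, 1, pm.1), pyExpandtabs ("\t -" ++ pm.1) 16, pm.2))
          ++ [((pc.1, 1, pcol.1, 0, ""), pyExpandtabs ("\t -" ++ pcol.1) 8, sumItems pcol.2.items)]))
        ++ [((pc.1, 0, "", 0, ""), pc.1, totalD pc.2)]) := by
    intro pc _ keyed
    dsimp only
    have hcol : ∀ (acc : List ((String × Nat × String × Nat × String) × String × Int) × Int)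
        (pcol : String × PySem.Dict String Int),
        (let res2 := pcol.2.items.foldl
            (fun (acc2 : List ((String × Nat × String × Nat × String) × String × Int) × Int) pm =>
              (acc2.1 ++ [((pc.1, 1, pcol.1, 1, pm.1), pyExpandtabs ("\t -" ++ pm.1) 16, pm.2)],
               acc2.2 + pm.2))
            (acc.1, 0)
         (res2.1 ++ [((pc.1, 1, pcol.1, 0, ""), pyExpandtabs ("\t -" ++ pcol.1) 8, res2.2)],
          acc.2 + res2.2))
        = (acc.1 ++ (pcol.2.items.map (fun pm =>
              ((pc.1, 1, pcol.1, 1, pm.1), pyExpandtabs ("\t -" ++ pm.1) 16, pm.2))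
            ++ [((pc.1, 1, pcol.1, 0, ""), pyExpandtabs ("\t -" ++ pcol.1) 8, sumItems pcol.2.items)]),
           acc.2 + sumItems pcol.2.items) := by
      intro acc pcol
      dsimp only
      rw [foldl_pair pcol.2.items
          (fun pm => [((pc.1, 1, pcol.1, 1, pm.1), pyExpandtabs ("\t -" ++ pm.1) 16, pm.2)])
          (fun pm => pm.2) acc.1 0]
      simp [sumItems, List.append_assoc, ← List.map_eq_flatMap]
    rw [PySem.List.foldl_congr_mem' pc.2.items _
        (fun acc pcol =>
          (acc.1 ++ (pcol.2.items.map (fun pm =>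
              ((pc.1, 1, pcol.1, 1, pm.1), pyExpandtabs ("\t -" ++ pm.1) 16, pm.2))
            ++ [((pc.1, 1, pcol.1, 0, ""), pyExpandtabs ("\t -" ++ pcol.1) 8, sumItems pcol.2.items)]),
           acc.2 + sumItems pcol.2.items))
        (keyed, 0) (fun pcol _ acc => hcol acc pcol),
      foldl_pair pc.2.items _ (fun pcol => sumItems pcol.2.items) keyed 0]
    simp [totalD, List.append_assoc]
  rw [PySem.List.foldl_congr_mem' _ _ _ _ hbody, PySem.List.foldl_append_eq_flatMap]
  simp

-- the built rows are a permutation of the canonical (sorted-order) rows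
theorem keyed_perm_canon (datos : List (String × List (String × List (String × Int)))) :
    (canonRows datos).Perm
      ((toDict3 datos).items.flatMap (fun pc =>
        (pc.2.items.flatMap (fun pcol =>
          pcol.2.items.map (fun pm =>
            ((pc.1, 1, pcol.1, 1, pm.1), pyExpandtabs ("\t -" ++ pm.1) 16, pm.2))
          ++ [((pc.1, 1, pcol.1, 0, ""), pyExpandtabs ("\t -" ++ pcol.1) 8, sumItems pcol.2.items)]))
        ++ [((pc.1, 0, "", 0, ""), pc.1, totalD pc.2)])) := by
  set d := toDict3 datos with hd
  have hndd : d.keys.Nodup := by rw [hd]; exact PySem.Dict.nodup_keys_ofList _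
  rw [PySem.Dict.items_eq_map_keys d hndd PySem.Dict.empty, List.flatMap_map]
  unfold canonRows
  rw [← hd]
  refine List.Perm.trans (List.Perm.flatMap_right _ (PySem.List.sorted_perm d.keys (fun k => k) false)) ?_
  apply List.Perm.flatMap_left
  intro c _
  dsimp only
  set dc := d.getD c PySem.Dict.empty with hdc
  have hnd1 : dc.keys.Nodup := by rw [hdc, hd]; exact nodup_keys_level1 datos c
  unfold canonBlock
  refine List.Perm.trans ?_ (List.perm_append_singleton _ _).symm
  apply List.Perm.cons
  rw [PySem.Dict.items_eq_map_keys dc hnd1 PySem.Dict.empty, List.flatMap_map]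
  refine List.Perm.trans (List.Perm.flatMap_right _ (PySem.List.sorted_perm dc.keys (fun k => k) false)) ?_
  apply List.Perm.flatMap_left
  intro col _
  dsimp only
  set dcc := dc.getD col PySem.Dict.empty with hdcc
  have hnd2 : dcc.keys.Nodup := by rw [hdcc, hdc, hd]; exact nodup_keys_level2 datos c col
  unfold colorBlock
  refine List.Perm.trans ?_ (List.perm_append_singleton _ _).symm
  apply List.Perm.cons
  unfold moldeRows
  rw [PySem.Dict.items_eq_map_keys dcc hnd2 0, List.map_map]
  exact List.Perm.map _ (PySem.List.sorted_perm dcc.keys (fun k => k) false)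

-- every row of a color block carries (c, 1, col, _, _) as key
theorem mem_colorBlock_key (c col : String) (dcc : PySem.Dict String Int)
    (r : (String × Nat × String × Nat × String) × String × Int) (h : r ∈ colorBlock c col dcc) :
    ∃ p m, r.1 = (c, 1, col, p, m) := by
  unfold colorBlock moldeRows at h
  rw [List.mem_cons] at h
  rcases h with h | h
  · exact ⟨0, "", by rw [h]⟩
  · simp only [List.mem_map] at h
    obtain ⟨mo, _, hmo⟩ := h
    exact ⟨1, mo, by rw [← hmo]⟩

-- every row of a client block carries c as first key component
theorem mem_canonBlock_key (c : String) (dc : PySem.Dict String (PySem.Dict String Int))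
    (r : (String × Nat × String × Nat × String) × String × Int) (h : r ∈ canonBlock c dc) :
    ∃ b col p m, r.1 = (c, b, col, p, m) := by
  unfold canonBlock at h
  rw [List.mem_cons] at h
  rcases h with h | h
  · exact ⟨0, "", 0, "", by rw [h]⟩
  · simp only [List.mem_flatMap] at h
    obtain ⟨col, _, hr⟩ := h
    obtain ⟨p, m, hk⟩ := mem_colorBlock_key c col _ r hr
    exact ⟨1, col, p, m, hk⟩

-- the canonical rows are strictly increasing in their keys
theorem canon_pairwise (datos : List (String × List (String × List (String × Int)))) :
    (canonRows datos).Pairwise (fun r r' => lexOf r.1 < lexOf r'.1) := by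
  unfold canonRows
  rw [List.flatMap_def, List.pairwise_flatten]
  constructor
  · intro l hl
    simp only [List.mem_map] at hl
    obtain ⟨c, _, hc⟩ := hl
    rw [← hc]
    unfold canonBlock
    rw [List.pairwise_cons]
    constructor
    · intro r hr
      simp only [List.mem_flatMap] at hr
      obtain ⟨col, _, hrc⟩ := hr
      obtain ⟨p, m, hk⟩ := mem_colorBlock_key c col _ r hrc
      rw [hk, lexOf_lt_iff]
      simp
    · rw [List.flatMap_def, List.pairwise_flatten]
      constructor
      · intro l' hl'
        simp only [List.mem_map] at hl'
        obtain ⟨col, _, hcol⟩ := hl'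
        rw [← hcol]
        unfold colorBlock
        rw [List.pairwise_cons]
        constructor
        · intro r hr
          unfold moldeRows at hr
          simp only [List.mem_map] at hr
          obtain ⟨mo, _, hmo⟩ := hr
          rw [← hmo, lexOf_lt_iff]
          simp
        · unfold moldeRows
          rw [List.pairwise_map]
          refine (sorted_strict _ (nodup_keys_level2 datos c col)).imp ?_
          intro m m' hlt
          rw [lexOf_lt_iff]
          simp [hlt]
      · rw [List.pairwise_map]
        refine (sorted_strict _ (nodup_keys_level1 datos c)).imp ?_
        intro col col' hlt r hr r' hr'
        obtain ⟨p, m, hk⟩ := mem_colorBlock_key c col _ r hr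
        obtain ⟨p', m', hk'⟩ := mem_colorBlock_key c col' _ r' hr'
        rw [hk, hk', lexOf_lt_iff]
        simp [hlt]
  · rw [List.pairwise_map]
    have hndd : (toDict3 datos).keys.Nodup := PySem.Dict.nodup_keys_ofList _
    refine (sorted_strict _ hndd).imp ?_
    intro c c' hlt r hr r' hr'
    obtain ⟨b, col, p, m, hk⟩ := mem_canonBlock_key c _ r hr
    obtain ⟨b', col', p', m', hk'⟩ := mem_canonBlock_key c' _ r' hr'
    rw [hk, hk', lexOf_lt_iff]
    simp [hlt]

-- ===== B computes the canonical rows (projected) =====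
theorem B_eq_canon (datos : List (String × List (String × List (String × Int)))) :
    generaFilasConSubtotales_py_alt datos = (canonRows datos).map (fun r => r.2) := by
  unfold generaFilasConSubtotales_py_alt
  dsimp only
  rw [keyed_eq_flatMap datos]
  have hbe : (fun (a b : (String × Nat × String × Nat × String) × String × Int) => keyLt a.1 b.1)
      = (fun a b => decide (lexOf a.1 < lexOf b.1)) := by
    funext a b; exact keyLt_eq a.1 b.1
  rw [hbe]
  have hs := (PySem.List.sorted_eq_foldl_insertBy
    ((toDict3 datos).items.flatMap (fun pc =>
        (pc.2.items.flatMap (fun pcol =>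
          pcol.2.items.map (fun pm =>
            ((pc.1, 1, pcol.1, 1, pm.1), pyExpandtabs ("\t -" ++ pm.1) 16, pm.2))
          ++ [((pc.1, 1, pcol.1, 0, ""), pyExpandtabs ("\t -" ++ pcol.1) 8, sumItems pcol.2.items)]))
        ++ [((pc.1, 0, "", 0, ""), pc.1, totalD pc.2)]))
    (fun r => lexOf r.1)).symm
  rw [hs]
  rw [PySem.List.sorted_eq_of_perm_of_pairwise_lt _ _ (fun r => lexOf r.1)
    (keyed_perm_canon datos) (canon_pairwise datos)]

-- ===== VERDICT (by name: the statement is the Claim_ definition above) =====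
theorem generaFilasConSubtotales_py_spec : Claim_equal_generaFilasConSubtotales_py := by
  intro datos _
  unfold Spec_generaFilasConSubtotales_py
  rw [A_eq_canon datos, B_eq_canon datos]
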